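-- pv_equiv track=rewrite | github.com/Merwanel/everybodycodes24 | q2/sol.py | rolling_hash_marking
-- ===== SOURCE A (Python) =====
-- def rolling_hash_marking(rune:str, inscription:str) -> tuple[int, set[int]] :
--     if len(rune) > len(inscription) :
--         return 0, set()
--     nb_match = 0
--     marking = set()
--     hash_rune = 0
--     for letter in rune :
--         hash_rune *= 10
--         hash_rune += ord(letter)
--     hash_inscription = 0
--     for i in range(len(rune)) :
--         hash_inscription *= 10
--         hash_inscription += ord(inscription[i])
--     if hash_inscription == hash_rune and inscription[:len(rune)] == rune :
--         nb_match += 1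
--         marking.update(range(i-len(rune)+1, i+1))
--
--     for i in range(len(rune), len(inscription)) :
--         i = i % len(inscription)
--
--         hash_inscription *= 10
--         hash_inscription += ord(inscription[i])
--         hash_inscription -= 10 ** (len(rune)) * ord(inscription[i-len(rune)])
--         if hash_inscription == hash_rune and inscription[i-len(rune)+1:i+1] == rune :
--             nb_match += 1
--             marking.update(range(i-len(rune)+1, i+1))
--
--     return nb_match, marking
-- ===== SOURCE B (Python) =====
-- def rolling_hash_marking(rune: str, inscription: str) -> tuple[int, set[int]]:
--     m = len(rune)
--     starts = [s for s in range(len(inscription) - m + 1) if inscription[s:s + m] == rune]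
--     marking = {i for s in starts for i in range(s, s + m)}
--     return len(starts), marking
-- ===== Notes on version B (the rewrite author's own statement) =====
-- stated objective: simpler
-- what changed: B drops the rolling-hash machinery (and its per-step big-integer 10**m arithmetic) entirely and instead filters the candidate start positions by a direct slice comparison, building the count and the marked-index set in two comprehensions.
import Mathlib
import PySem

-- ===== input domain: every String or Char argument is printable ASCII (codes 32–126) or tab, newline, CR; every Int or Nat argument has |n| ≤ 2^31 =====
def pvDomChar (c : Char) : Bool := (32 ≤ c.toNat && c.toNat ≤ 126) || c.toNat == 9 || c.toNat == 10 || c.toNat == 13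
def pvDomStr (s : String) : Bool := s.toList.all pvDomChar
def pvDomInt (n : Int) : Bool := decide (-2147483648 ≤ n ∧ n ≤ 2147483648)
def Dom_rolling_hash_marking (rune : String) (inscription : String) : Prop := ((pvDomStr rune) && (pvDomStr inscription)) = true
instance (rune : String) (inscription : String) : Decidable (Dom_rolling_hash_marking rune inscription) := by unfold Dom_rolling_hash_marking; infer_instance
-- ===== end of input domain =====

-- B replaces A's rolling hash by a direct filter of the start positions with a slice
-- comparison (objective: simpler). A raises UnboundLocalError when rune = ""; Pre_ excludes that.

-- ===== PORT A =====
-- ord(c) for the ASCII domain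
def pvOrd (c : Char) : Int := (c.toNat : Int)

-- body of A's second loop (state = (nb_match, marking, hash_inscription))
def pvStepA (rs cs : List Char) (st : Int × List Int × Int) (i0 : Int) : Int × List Int × Int :=
  let i := PySem.Int.mod i0 (cs.length : Int)                       -- i = i % len(inscription)
  let h := st.2.2 * 10 + pvOrd (PySem.List.pyGetD cs i ' ')
           - 10 ^ rs.length * pvOrd (PySem.List.pyGetD cs (i - rs.length) ' ')
  if h == (rs.foldl (fun h c => h * 10 + pvOrd c) 0)
     && PySem.List.slice cs (some (i - rs.length + 1)) (some (i + 1)) == rs then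
    (st.1 + 1, PySem.Set.update st.2.1 (PySem.List.pyRange (i - rs.length + 1) (i + 1) 1), h)
  else (st.1, st.2.1, h)

def rolling_hash_marking (rune : String) (inscription : String) : Int × List Int :=
  let rs := rune.toList
  let cs := inscription.toList
  if rs.length > cs.length then (0, []) else
  let hash_rune : Int := rs.foldl (fun h c => h * 10 + pvOrd c) 0
  let hash_ins : Int :=
    (PySem.List.pyRange 0 (rs.length : Int) 1).foldl
      (fun h i => h * 10 + pvOrd (PySem.List.pyGetD cs i ' ')) 0
  -- after the first `for i in range(len(rune))` loop, i = len(rune) - 1 (rune ≠ "" under Pre_)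
  let i : Int := (rs.length : Int) - 1
  let (nb, marking) :=
    if hash_ins == hash_rune && PySem.List.slice cs none (some (rs.length : Int)) == rs then
      ((1 : Int), PySem.Set.update ([] : PySem.Set Int)
        (PySem.List.pyRange (i - rs.length + 1) (i + 1) 1))
    else ((0 : Int), ([] : PySem.Set Int))
  let st := (PySem.List.pyRange (rs.length : Int) (cs.length : Int) 1).foldl
      (pvStepA rs cs) (nb, marking, hash_ins)
  (st.1, st.2.1)

-- ===== PORT B =====
def rolling_hash_marking_alt (rune : String) (inscription : String) : Int × List Int :=
  let rs := rune.toList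
  let cs := inscription.toList
  let m : Int := rs.length
  let starts := (PySem.List.pyRange 0 ((cs.length : Int) - m + 1) 1).filter
      (fun s => PySem.List.slice cs (some s) (some (s + m)) == rs)
  let marking : PySem.Set Int :=
    PySem.Set.ofList (starts.flatMap (fun s => PySem.List.pyRange s (s + m) 1))
  ((starts.length : Int), marking)

-- ===== PRECONDITION & SPEC =====
-- Pre_ excludes exactly rune = "", the only inputs on which the Python A raises
-- (UnboundLocalError: the first loop's variable i is never bound).
def Pre_rolling_hash_marking (rune : String) (inscription : String) : Prop := rune ≠ ""
instance (rune : String) (inscription : String) : Decidable (Pre_rolling_hash_marking rune inscription) := by unfold Pre_rolling_hash_marking; infer_instance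
def pvWitness_rolling_hash_marking : String × String := ("ab", "xababb")

def Spec_rolling_hash_marking (rune : String) (inscription : String) (out : Int × List Int) : Prop := out = rolling_hash_marking_alt rune inscription
instance (rune : String) (inscription : String) (out : Int × List Int) : Decidable (Spec_rolling_hash_marking rune inscription out) := by unfold Spec_rolling_hash_marking; infer_instance

-- ===== CLAIM (what is proved, stated in full; the proofs are below) =====
def Claim_equal_rolling_hash_marking : Prop := ∀ (rune : String) (inscription : String), Dom_rolling_hash_marking rune inscription → Pre_rolling_hash_marking rune inscription → Spec_rolling_hash_marking rune inscription (rolling_hash_marking rune inscription)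

-- ===== LEMMAS AND PROOFS =====

-- the base-10 "hash" of a character list (A's hashing scheme)
def pvH (l : List Char) : Int := l.foldl (fun h c => h * 10 + pvOrd c) 0
-- the window of length m starting at s
def pvWin (cs : List Char) (m s : Nat) : List Char := (cs.drop s).take m

theorem pvH_from (l : List Char) : ∀ a : Int, l.foldl (fun h c => h * 10 + pvOrd c) a = a * 10 ^ l.length + pvH l := by
  induction l with
  | nil => intro a; simp [pvH]
  | cons c t ih =>
    intro a
    show t.foldl _ (a * 10 + pvOrd c) = a * 10 ^ (c :: t).length + pvH (c :: t)
    have h2 : pvH (c :: t) = t.foldl (fun h c => h * 10 + pvOrd c) (0 * 10 + pvOrd c) := rfl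
    rw [ih, h2, ih (0 * 10 + pvOrd c), List.length_cons, pow_succ]; ring

theorem pvH_cons (c : Char) (t : List Char) : pvH (c :: t) = pvOrd c * 10 ^ t.length + pvH t := by
  have h2 : pvH (c :: t) = t.foldl (fun h c => h * 10 + pvOrd c) (0 * 10 + pvOrd c) := rfl
  rw [h2, pvH_from]; ring

theorem pvH_snoc (t : List Char) (c : Char) : pvH (t ++ [c]) = pvH t * 10 + pvOrd c := by
  simp [pvH, List.foldl_append]

theorem pvWin_cons (cs : List Char) (m s : Nat) (hm : 1 ≤ m) (hs : s < cs.length) :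
    pvWin cs m s = cs[s] :: (cs.drop (s+1)).take (m-1) := by
  unfold pvWin
  obtain ⟨m', rfl⟩ : ∃ m', m = m' + 1 := ⟨m - 1, by omega⟩
  rw [List.drop_eq_getElem_cons hs, List.take_succ_cons]
  norm_num

theorem pvWin_snoc (cs : List Char) (m s : Nat) (hm : 1 ≤ m) (h : s + m < cs.length) :
    pvWin cs m (s+1) = (cs.drop (s+1)).take (m-1) ++ [cs[s+m]] := by
  unfold pvWin
  obtain ⟨m', rfl⟩ : ∃ m', m = m' + 1 := ⟨m - 1, by omega⟩
  rw [List.take_succ]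
  have hlt : m' < (cs.drop (s+1)).length := by simp; omega
  rw [List.getElem?_eq_getElem hlt]
  have hidx : (cs.drop (s+1))[m']'hlt = cs[s + (m' + 1)] := by
    rw [List.getElem_drop]
    exact getElem_congr_idx (by omega)
  simp [hidx]

theorem pvSlide (cs : List Char) (m s : Nat) (hm : 1 ≤ m) (h : s + m < cs.length) :
    pvH (pvWin cs m s) * 10 + pvOrd (cs.getD (m + s) ' ') - 10 ^ m * pvOrd (cs.getD s ' ')
      = pvH (pvWin cs m (s + 1)) := by
  have ht : ((cs.drop (s+1)).take (m-1)).length = m - 1 := by simp; omega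
  rw [pvWin_cons cs m s hm (by omega), pvWin_snoc cs m s hm h, pvH_cons, pvH_snoc, ht]
  rw [List.getD_eq_getElem cs ' ' (show m + s < cs.length by omega),
      List.getD_eq_getElem cs ' ' (show s < cs.length by omega)]
  have hidx : cs[m + s]'(by omega) = cs[s + m]'(by omega) := getElem_congr_idx (by omega)
  have hpow : (10:Int) ^ (m-1) * 10 = 10 ^ m := by
    rw [← pow_succ]; congr 1; omega
  rw [hidx]
  linear_combination (pvOrd cs[s]) * hpow

theorem pvCond (a b : Int) (x y : List Char) (ha : a = pvH x) (hb : b = pvH y) :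
    ((a == b) && (x == y)) = (x == y) := by
  by_cases h : x = y
  · subst h; simp [ha, hb]
  · simp [h]

theorem pvRangeFold (f : Int → Char → Int) (d : Char) (cs : List Char) :
    ∀ (m : Nat), m ≤ cs.length → ∀ init : Int,
      (List.range m).foldl (fun h k => f h (cs.getD k d)) init = (cs.take m).foldl f init := by
  intro m
  induction m with
  | zero => simp
  | succ m' ih =>
    intro hm init
    rw [List.range_succ, List.foldl_append, ih (by omega), List.take_succ, List.foldl_append]
    simp [List.getElem?_eq_getElem (show m' < cs.length by omega),
          List.getD_eq_getElem cs d (show m' < cs.length by omega)]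

theorem pvInitHash (cs : List Char) (m : Nat) (hmn : m ≤ cs.length) :
    (PySem.List.pyRange 0 (m:Int) 1).foldl (fun h i => h * 10 + pvOrd (PySem.List.pyGetD cs i ' ')) 0
      = pvH (cs.take m) := by
  rw [PySem.List.pyRange_one]
  have h0 : ((m:Int) - 0).toNat = m := by omega
  rw [h0, List.foldl_map]
  simp only [zero_add, PySem.List.pyGetD_natCast]
  exact pvRangeFold (fun h c => h * 10 + pvOrd c) ' ' cs m hmn 0

theorem pvSliceWin (cs : List Char) (m k : Nat) :
    PySem.List.slice cs (some (k:Int)) (some ((k:Int) + (m:Int))) = pvWin cs m k :=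
  PySem.List.slice_natCast_add cs k m

theorem pvUpdate_append (s : PySem.Set Int) (xs ys : List Int) :
    PySem.Set.update (PySem.Set.update s xs) ys = PySem.Set.update s (xs ++ ys) := by
  simp [PySem.Set.update, List.foldl_append]

theorem pvOfList_eq_update (xs : List Int) :
    PySem.Set.ofList xs = PySem.Set.update ([] : PySem.Set Int) xs := by
  simp [PySem.Set.ofList_eq_foldl, PySem.Set.update]

theorem pvStepA_eq (rs cs : List Char) (hm : 1 ≤ rs.length) (hmn : rs.length ≤ cs.length)
    (k : Nat) (hk : k < cs.length - rs.length) (nb : Int) (marking : List Int) :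
    pvStepA rs cs (nb, marking, pvH (pvWin cs rs.length k)) ((rs.length : Int) + (k : Int)) =
    (if pvWin cs rs.length (k+1) == rs
     then (nb + 1,
           PySem.Set.update marking (PySem.List.pyRange ((k:Int)+1) (((k:Int)+1) + (rs.length:Int)) 1),
           pvH (pvWin cs rs.length (k+1)))
     else (nb, marking, pvH (pvWin cs rs.length (k+1)))) := by
  have hmod : PySem.Int.mod ((rs.length:Int) + (k:Int)) (cs.length:Int) = (rs.length:Int) + (k:Int) := by
    rw [PySem.Int.mod_eq_emod_of_pos (by omega)]
    exact Int.emod_eq_of_lt (by omega) (by omega)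
  have hg1 : PySem.List.pyGetD cs ((rs.length:Int) + (k:Int)) ' ' = cs.getD (rs.length + k) ' ' := by
    have h1 : ((rs.length:Int) + (k:Int)) = ((rs.length + k : Nat) : Int) := by push_cast; ring
    rw [h1, PySem.List.pyGetD_natCast]
  have hi1 : (rs.length:Int) + (k:Int) - (rs.length:Int) = ((k:Nat):Int) := by ring
  have hg2 : PySem.List.pyGetD cs ((rs.length:Int) + (k:Int) - (rs.length:Int)) ' ' = cs.getD k ' ' := by
    rw [hi1, PySem.List.pyGetD_natCast]
  have hh : pvH (pvWin cs rs.length k) * 10 + pvOrd (cs.getD (rs.length + k) ' ')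
      - 10 ^ rs.length * pvOrd (cs.getD k ' ') = pvH (pvWin cs rs.length (k+1)) :=
    pvSlide cs rs.length k hm (by omega)
  have hs1 : (rs.length:Int) + (k:Int) - (rs.length:Int) + 1 = ((k+1:Nat):Int) := by push_cast; ring
  have hs2 : (rs.length:Int) + (k:Int) + 1 = ((k+1:Nat):Int) + ((rs.length:Nat):Int) := by push_cast; ring
  have hslice : PySem.List.slice cs (some ((rs.length:Int) + (k:Int) - (rs.length:Int) + 1))
      (some ((rs.length:Int) + (k:Int) + 1)) = pvWin cs rs.length (k+1) := by
    rw [hs1, hs2]; exact pvSliceWin cs rs.length (k+1)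
  have hr : rs.foldl (fun h c => h * 10 + pvOrd c) 0 = pvH rs := rfl
  simp only [pvStepA, hmod, hg1, hg2, hh, hslice, hr]
  rw [pvCond (pvH (pvWin cs rs.length (k+1))) (pvH rs) (pvWin cs rs.length (k+1)) rs rfl rfl]
  rw [hs1, hs2]
  push_cast
  rfl

theorem pvLoopA (rs cs : List Char) (hm : 1 ≤ rs.length) (hmn : rs.length ≤ cs.length) :
    ∀ (d k : Nat), k + d = cs.length - rs.length → ∀ (nb : Int) (marking : List Int),
    (((PySem.List.pyRange ((rs.length : Int) + (k : Int)) ((cs.length : Int)) 1).foldl (pvStepA rs cs)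
        (nb, marking, pvH (pvWin cs rs.length k))).1,
     ((PySem.List.pyRange ((rs.length : Int) + (k : Int)) ((cs.length : Int)) 1).foldl (pvStepA rs cs)
        (nb, marking, pvH (pvWin cs rs.length k))).2.1) =
    (nb + (((PySem.List.pyRange ((k : Int) + 1) (((cs.length - rs.length + 1 : Nat) : Int)) 1).filter
          (fun s => PySem.List.slice cs (some s) (some (s + (rs.length : Int))) == rs)).length : Int),
     PySem.Set.update marking
       (((PySem.List.pyRange ((k : Int) + 1) (((cs.length - rs.length + 1 : Nat) : Int)) 1).filter
          (fun s => PySem.List.slice cs (some s) (some (s + (rs.length : Int))) == rs)).flatMap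
          (fun s => PySem.List.pyRange s (s + (rs.length : Int)) 1))) := by
  intro d
  induction d with
  | zero =>
    intro k hk nb marking
    rw [PySem.List.pyRange_one_eq_nil (show (cs.length:Int) ≤ (rs.length:Int) + (k:Int) by omega),
        PySem.List.pyRange_one_eq_nil (show ((cs.length - rs.length + 1 : Nat):Int) ≤ (k:Int) + 1 by omega)]
    simp [PySem.Set.update]
  | succ d ih =>
    intro k hk nb marking
    have hkd : k < cs.length - rs.length := by omega
    rw [PySem.List.pyRange_one_cons (show (rs.length:Int) + (k:Int) < (cs.length:Int) by omega)]
    rw [List.foldl_cons, pvStepA_eq rs cs hm hmn k hkd nb marking]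
    have hrange : (rs.length:Int) + (k:Int) + 1 = (rs.length:Int) + ((k+1:Nat):Int) := by push_cast; ring
    rw [hrange]
    rw [PySem.List.pyRange_one_cons
        (show (k:Int) + 1 < ((cs.length - rs.length + 1 : Nat):Int) by omega)]
    simp only [List.filter_cons]
    have hpred : (PySem.List.slice cs (some ((k:Int)+1)) (some (((k:Int)+1) + (rs.length:Int))) == rs)
        = (pvWin cs rs.length (k+1) == rs) := by
      have h1 : ((k:Int)+1) = ((k+1:Nat):Int) := by push_cast; ring
      rw [h1, pvSliceWin]
    rw [hpred]
    have hnext : (k+1) + d = cs.length - rs.length := by omega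
    have hcast : ((k+1:Nat):Int) + 1 = (k:Int) + 1 + 1 := by push_cast; ring
    cases hmatch : (pvWin cs rs.length (k+1) == rs) with
    | true =>
      rw [if_pos rfl, if_pos rfl]
      rw [ih (k+1) hnext (nb + 1)
          (PySem.Set.update marking (PySem.List.pyRange ((k:Int)+1) (((k:Int)+1) + (rs.length:Int)) 1))]
      rw [hcast, List.flatMap_cons, ← pvUpdate_append, Prod.mk.injEq]
      refine ⟨?_, rfl⟩
      simp only [List.length_cons]
      push_cast
      ring
    | false =>
      rw [if_neg (by simp), if_neg (by simp)]
      rw [ih (k+1) hnext nb marking, hcast]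

-- ===== VERDICT (by name: the statement is the Claim_ definition above) =====
theorem rolling_hash_marking_spec : Claim_equal_rolling_hash_marking := by
  intro rune inscription _ hpre
  unfold Spec_rolling_hash_marking
  simp only [rolling_hash_marking, rolling_hash_marking_alt]
  set rs := rune.toList with hrsdef
  set cs := inscription.toList with hcsdef
  have hm : 1 ≤ rs.length := by
    by_contra hc
    apply hpre
    have hnil : rune.toList = [] := by
      rw [← hrsdef]; exact List.eq_nil_of_length_eq_zero (by omega)
    exact String.toList_eq_nil_iff.mp hnil
  by_cases hgt : rs.length > cs.length
  · rw [if_pos hgt]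
    rw [PySem.List.pyRange_one_eq_nil (show (cs.length:Int) - rs.length + 1 ≤ 0 by omega)]
    simp [PySem.Set.ofList_eq_foldl]
  · push_neg at hgt
    rw [if_neg (by omega)]
    rw [pvInitHash cs rs.length hgt]
    have hw0 : cs.take rs.length = pvWin cs rs.length 0 := by simp [pvWin]
    have hsl : PySem.List.slice cs none (some (rs.length:Int)) = cs.take rs.length :=
      PySem.List.slice_to_natCast cs rs.length
    have hr : rs.foldl (fun h c => h * 10 + pvOrd c) 0 = pvH rs := rfl
    rw [hsl, hw0, hr,
        pvCond (pvH (pvWin cs rs.length 0)) (pvH rs) (pvWin cs rs.length 0) rs rfl rfl]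
    have ha : (rs.length:Int) - 1 - rs.length + 1 = 0 := by ring
    have hb : (rs.length:Int) - 1 + 1 = (rs.length:Int) := by ring
    rw [ha, hb]
    have hbB : (cs.length:Int) - rs.length + 1 = ((cs.length - rs.length + 1 : Nat):Int) := by omega
    rw [hbB, PySem.List.pyRange_one_cons
        (show (0:Int) < ((cs.length - rs.length + 1 : Nat):Int) by omega)]
    simp only [List.filter_cons]
    have hpred0 : (PySem.List.slice cs (some (0:Int)) (some ((0:Int) + (rs.length:Int))) == rs)
        = (pvWin cs rs.length 0 == rs) := by
      have h1 : (0:Int) = ((0:Nat):Int) := by norm_num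
      rw [h1, pvSliceWin]
    rw [hpred0]
    have L := pvLoopA rs cs hm hgt (cs.length - rs.length) 0 (by omega)
    simp only [Nat.cast_zero, add_zero, zero_add] at L
    cases hmatch : (pvWin cs rs.length 0 == rs) with
    | true =>
      rw [if_pos rfl, if_pos rfl]
      rw [L 1 (PySem.Set.update ([] : PySem.Set Int) (PySem.List.pyRange 0 (rs.length:Int) 1))]
      simp only [List.flatMap_cons, zero_add, List.length_cons]
      rw [pvOfList_eq_update, ← pvUpdate_append, Prod.mk.injEq]
      refine ⟨?_, rfl⟩
      push_cast
      ring
    | false =>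
      rw [if_neg (by simp), if_neg (by simp)]
      rw [L 0 ([] : PySem.Set Int), pvOfList_eq_update]
      simp only [zero_add]
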